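-- pv_equiv track=rewrite | github.com/shaby3/coding_test | 260422/Carry 피하기 2/escaping-carry-2.py | check_carry
-- ===== SOURCE A (Python) =====
-- def check_carry(num1, num2, num3):
--     max_len = max(len(str(num1)), len(str(num2)), len(str(num3)))
--     str_num1 = str(num1).zfill(max_len)
--     str_num2 = str(num2).zfill(max_len)
--     str_num3 = str(num3).zfill(max_len)
--
--     for idx in range(max_len):
--         if int(str_num1[idx]) + int(str_num2[idx]) + int(str_num3[idx]) >= 10:
--             return 0
--
--     return num1 + num2 + num3
-- ===== SOURCE B (Python) =====
-- def check_carry(num1, num2, num3):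
--     a, b, c = num1, num2, num3
--     while a or b or c:
--         if a % 10 + b % 10 + c % 10 >= 10:
--             return 0
--         a //= 10
--         b //= 10
--         c //= 10
--     return num1 + num2 + num3
-- ===== Notes on version B (the rewrite author's own statement) =====
-- stated objective: idiomatic
-- what changed: Replaces string conversion, zfill padding and per-character int() parsing over index positions with a pure arithmetic loop that extracts digits with %10 and //10 until all three numbers are exhausted.
import Mathlib
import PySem

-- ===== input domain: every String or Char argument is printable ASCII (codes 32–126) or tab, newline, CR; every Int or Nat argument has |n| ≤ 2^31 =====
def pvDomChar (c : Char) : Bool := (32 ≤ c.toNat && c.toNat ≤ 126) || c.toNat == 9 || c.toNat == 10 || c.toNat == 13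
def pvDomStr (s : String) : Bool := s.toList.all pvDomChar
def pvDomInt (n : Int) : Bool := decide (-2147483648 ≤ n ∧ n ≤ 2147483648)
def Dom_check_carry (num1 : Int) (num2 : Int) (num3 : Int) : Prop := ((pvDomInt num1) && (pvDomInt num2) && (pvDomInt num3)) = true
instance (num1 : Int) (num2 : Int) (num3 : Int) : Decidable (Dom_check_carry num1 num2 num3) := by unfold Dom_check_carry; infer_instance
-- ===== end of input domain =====

-- B replaces A's string conversion, zfill padding and per-character int() parsing with a
-- pure arithmetic digit loop (%10, //10) — idiomatic re-implementation, same cost class.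

-- ===== PORT A =====
-- int(s[idx]) : inside Pre_ the index is always in range and the char a decimal digit;
-- the getD defaults only totalize the out-of-Pre_ cases (where Python raises).
def pyDigitAt (cs : List Char) (idx : Int) : Int :=
  (PySem.Int.ofChars? [PySem.List.pyGetD cs idx '0']).getD 0

-- the 'for idx in range(max_len)' loop with its early 'return 0'
def check_carry_go (s1 s2 s3 : List Char) (idxs : List Int) (num1 num2 num3 : Int) : Int :=
  match idxs with
  | [] => num1 + num2 + num3
  | idx :: rest =>
    if pyDigitAt s1 idx + pyDigitAt s2 idx + pyDigitAt s3 idx ≥ 10 then 0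
    else check_carry_go s1 s2 s3 rest num1 num2 num3

def check_carry (num1 : Int) (num2 : Int) (num3 : Int) : Int :=
  let max_len : Int :=
    max (max (PySem.List.len (PySem.Int.toChars num1)) (PySem.List.len (PySem.Int.toChars num2)))
        (PySem.List.len (PySem.Int.toChars num3))
  let s1 := PySem.Chars.zfill (PySem.Int.toChars num1) max_len
  let s2 := PySem.Chars.zfill (PySem.Int.toChars num2) max_len
  let s3 := PySem.Chars.zfill (PySem.Int.toChars num3) max_len
  check_carry_go s1 s2 s3 (PySem.List.pyRange 0 max_len 1) num1 num2 num3

-- ===== PORT B =====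
-- B's 'while a or b or c' loop; the fuel only totalizes it (64 ≫ the 10 decimal digits
-- any |n| ≤ 2^31 input has, so it is never exhausted on the admitted domain).
def check_carry_alt_go (fuel : Nat) (a b c res : Int) : Int :=
  match fuel with
  | 0 => res
  | fuel + 1 =>
    if a ≠ 0 ∨ b ≠ 0 ∨ c ≠ 0 then
      if PySem.Int.mod a 10 + PySem.Int.mod b 10 + PySem.Int.mod c 10 ≥ 10 then 0
      else check_carry_alt_go fuel (PySem.Int.floordiv a 10) (PySem.Int.floordiv b 10)
             (PySem.Int.floordiv c 10) res
    else res

def check_carry_alt (num1 : Int) (num2 : Int) (num3 : Int) : Int :=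
  check_carry_alt_go 64 num1 num2 num3 (num1 + num2 + num3)

-- ===== PRECONDITION & SPEC =====
-- Pre_ excludes negative arguments: there A raises ValueError (int('-') on the sign
-- character of the zfilled string returns no value), and B's while-loop never terminates.
def Pre_check_carry (num1 : Int) (num2 : Int) (num3 : Int) : Prop :=
  0 ≤ num1 ∧ 0 ≤ num2 ∧ 0 ≤ num3
instance (num1 : Int) (num2 : Int) (num3 : Int) : Decidable (Pre_check_carry num1 num2 num3) := by
  unfold Pre_check_carry; infer_instance

def pvWitness_check_carry : Int × Int × Int := (15, 27, 3)

def Spec_check_carry (num1 : Int) (num2 : Int) (num3 : Int) (out : Int) : Prop := out = check_carry_alt num1 num2 num3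
instance (num1 : Int) (num2 : Int) (num3 : Int) (out : Int) : Decidable (Spec_check_carry num1 num2 num3 out) := by unfold Spec_check_carry; infer_instance

-- ===== CLAIM (what is proved, stated in full; the proofs are below) =====
def Claim_equal_check_carry : Prop := ∀ (num1 : Int) (num2 : Int) (num3 : Int), Dom_check_carry num1 num2 num3 → Pre_check_carry num1 num2 num3 → Spec_check_carry num1 num2 num3 (check_carry num1 num2 num3)

-- ===== LEMMAS AND PROOFS =====

-- decimal digit of m at position p (little-endian)
def pvDig (m p : Nat) : Nat := m / 10 ^ p % 10

theorem pvDig_zero_of_lt (m p L : Nat) (hm : m < 10 ^ L) (hp : L ≤ p) : pvDig m p = 0 := by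
  unfold pvDig
  have h1 : 10 ^ L ≤ 10 ^ p := Nat.pow_le_pow_right (by norm_num) hp
  have h2 : m / 10 ^ p = 0 := Nat.div_eq_of_lt (lt_of_lt_of_le hm h1)
  simp [h2]

theorem pvDig_div (m p : Nat) : pvDig (m / 10) p = pvDig m (p + 1) := by
  unfold pvDig
  rw [Nat.div_div_eq_div_mul, pow_succ, mul_comm]

theorem pvDig_zero_eq (m : Nat) : pvDig m 0 = m % 10 := by
  unfold pvDig; simp

-- parsing a single digit character
theorem pv_ofChars_digitChar (d : Nat) (hd : d < 10) :
    PySem.Int.ofChars? [Nat.digitChar d] = some (d : Int) := by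
  interval_cases d <;> decide

-- core's Nat.toDigitsCore, characterized by Nat.digits
theorem pv_toDigitsCore_eq (fuel : Nat) : ∀ (n : Nat) (acc : List Char), 0 < n → n < fuel →
    Nat.toDigitsCore 10 fuel n acc = ((Nat.digits 10 n).map Nat.digitChar).reverse ++ acc := by
  induction fuel with
  | zero => intro n acc h h'; omega
  | succ f ih =>
    intro n acc hn hf
    have hstep : Nat.toDigitsCore 10 (f + 1) n acc =
        (if n / 10 = 0 then (n % 10).digitChar :: acc
         else Nat.toDigitsCore 10 f (n / 10) ((n % 10).digitChar :: acc)) := by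
      simp [Nat.toDigitsCore]
    rw [hstep, Nat.digits_def' (by norm_num : 1 < 10) hn]
    by_cases h0 : n / 10 = 0
    · simp [h0]
    · have h1 : 0 < n / 10 := Nat.pos_of_ne_zero h0
      have h2 : n / 10 < f := by
        have : n / 10 < n := Nat.div_lt_self hn (by norm_num)
        omega
      simp [h0, ih (n / 10) ((n % 10).digitChar :: acc) h1 h2]

theorem pv_toDigits_eq (n : Nat) (hn : 0 < n) :
    Nat.toDigits 10 n = ((Nat.digits 10 n).map Nat.digitChar).reverse := by
  have h := pv_toDigitsCore_eq (n + 1) n [] hn (by omega)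
  simpa [Nat.toDigits] using h

-- every char of toDigits is a digitChar d with d < 10 (so never '+'/'-')
theorem pv_toDigits_mem (n : Nat) (c : Char) (hc : c ∈ Nat.toDigits 10 n) :
    ∃ d, d < 10 ∧ c = Nat.digitChar d := by
  rcases Nat.eq_zero_or_pos n with h0 | hpos
  · subst h0
    rw [show Nat.toDigits 10 0 = ['0'] from by decide, List.mem_singleton] at hc
    exact ⟨0, by norm_num, by rw [hc]; rfl⟩
  · rw [pv_toDigits_eq n hpos] at hc
    simp only [List.mem_reverse, List.mem_map] at hc
    obtain ⟨d, hd, hdc⟩ := hc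
    exact ⟨d, Nat.digits_lt_base (by norm_num) hd, hdc.symm⟩

theorem pv_toDigits_ne_nil (n : Nat) : Nat.toDigits 10 n ≠ [] := by
  rcases Nat.eq_zero_or_pos n with h0 | hpos
  · subst h0; decide
  · rw [pv_toDigits_eq n hpos]
    simp [Nat.digits_ne_nil_iff_ne_zero]
    omega

-- m fits in (toDigits m).length decimal digits
theorem pv_lt_pow_length (n : Nat) : n < 10 ^ (Nat.toDigits 10 n).length := by
  rcases Nat.eq_zero_or_pos n with h0 | hpos
  · subst h0; decide
  · rw [pv_toDigits_eq n hpos]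
    simpa using Nat.lt_base_pow_length_digits (b := 10) (m := n) (by norm_num)

-- zfill of a non-sign-leading string is plain left-padding with '0'
theorem pv_zfill_pad (c : Char) (rest : List Char) (hc : ¬ (c = '+' ∨ c = '-')) (w : Int) :
    PySem.Chars.zfill (c :: rest) w =
      List.replicate (w.toNat - (c :: rest).length) '0' ++ (c :: rest) := by
  unfold PySem.Chars.zfill
  by_cases hle : w ≤ ((c :: rest).length : Int)
  · rw [if_pos hle]
    have h0 : w.toNat - (c :: rest).length = 0 := by
      simp only [List.length_cons] at hle ⊢
      omega
    rw [h0]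
    simp
  · rw [if_neg hle]
    simp [hc]

-- zfill of a digit string is plain left-padding with '0'
theorem pv_zfill_digits (n : Nat) (w : Int) :
    PySem.Chars.zfill (Nat.toDigits 10 n) w =
      List.replicate (w.toNat - (Nat.toDigits 10 n).length) '0' ++ Nat.toDigits 10 n := by
  cases hcs : Nat.toDigits 10 n with
  | nil => exact absurd hcs (pv_toDigits_ne_nil n)
  | cons c rest =>
    have hmem : c ∈ Nat.toDigits 10 n := by rw [hcs]; exact List.mem_cons_self
    obtain ⟨d, hd, hdc⟩ := pv_toDigits_mem n c hmem
    have hc : ¬ (c = '+' ∨ c = '-') := by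
      subst hdc; interval_cases d <;> decide
    exact pv_zfill_pad c rest hc w

-- the character read by A's loop equals the arithmetic digit at the mirrored position
theorem pv_digitAt_eq (n L j : Nat) (hlen : (Nat.toDigits 10 n).length ≤ L) (hj : j < L) :
    pyDigitAt (PySem.Chars.zfill (Nat.toDigits 10 n) (L : Int)) (j : Int) =
      (pvDig n (L - 1 - j) : Int) := by
  have hk : ((L : Int)).toNat - (Nat.toDigits 10 n).length = L - (Nat.toDigits 10 n).length := by
    simp
  rw [pyDigitAt, pv_zfill_digits n (L : Int), hk, PySem.List.pyGetD_natCast]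
  set cs := Nat.toDigits 10 n with hcs
  set k := L - cs.length with hkdef
  by_cases hjk : j < k
  · -- inside the '0' padding: the mirrored digit position is ≥ cs.length, so the digit is 0
    have hget : (List.replicate k '0' ++ cs).getD j '0' = '0' := by
      rw [List.getD_eq_getElem?_getD, List.getElem?_append_left (by simpa using hjk)]
      simp [hjk]
    rw [hget]
    have hz : pvDig n (L - 1 - j) = 0 := by
      refine pvDig_zero_of_lt n _ cs.length (pv_lt_pow_length n) ?_
      omega
    rw [hz]; decide
  · -- inside the digits: reverse-indexed digit of n
    push Not at hjk
    have hjL : j - k < cs.length := by omega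
    have hget : (List.replicate k '0' ++ cs).getD j '0' = cs[j - k] := by
      rw [List.getD_eq_getElem?_getD, List.getElem?_append_right (by simpa using hjk)]
      simp [List.getElem?_eq_getElem (by simpa using hjL)]
    rw [hget]
    rcases Nat.eq_zero_or_pos n with h0 | hpos
    · subst h0
      have h1 : cs = ['0'] := by rw [hcs]; decide
      have h2 : cs[j - k] = '0' := by
        have : j - k = 0 := by rw [h1] at hjL; simp at hjL; omega
        simp [this, h1]
      rw [h2]
      have : pvDig 0 (L - 1 - j) = 0 := by unfold pvDig; simp
      rw [this]; decide
    · have hrev : cs = ((Nat.digits 10 n).map Nat.digitChar).reverse := by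
        rw [hcs]; exact pv_toDigits_eq n hpos
      set D := Nat.digits 10 n with hD
      have hlenD : cs.length = D.length := by rw [hrev]; simp
      have hp : D.length - 1 - (j - k) < D.length := by omega
      have hq : cs[j - k]? = some (Nat.digitChar D[D.length - 1 - (j - k)]) := by
        rw [hrev, List.getElem?_reverse (by simpa [hlenD] using hjL)]
        simp [List.getElem?_eq_getElem hp]
      have hgetrev : cs[j - k] = Nat.digitChar D[D.length - 1 - (j - k)] := by
        rw [List.getElem?_eq_getElem hjL] at hq
        exact Option.some.inj hq
      rw [hgetrev]
      have hd10 : D[D.length - 1 - (j - k)] < 10 :=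
        Nat.digits_lt_base (by norm_num) (List.getElem_mem hp)
      rw [pv_ofChars_digitChar _ hd10]
      have hpos' : D.length - 1 - (j - k) = L - 1 - j := by omega
      have hdig : D[D.length - 1 - (j - k)] = pvDig n (L - 1 - j) := by
        rw [← hpos']
        unfold pvDig
        rw [← Nat.getD_digits n (D.length - 1 - (j - k)) (by norm_num : 2 ≤ 10), ← hD,
          List.getD_eq_getElem?_getD, List.getElem?_eq_getElem hp]
        rfl
      rw [hdig]
      rfl

-- A's loop = "any column sums to ≥ 10"
theorem pv_go_eq (s1 s2 s3 : List Char) (n1 n2 n3 : Int) (idxs : List Int) :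
    check_carry_go s1 s2 s3 idxs n1 n2 n3 =
      if ∃ i ∈ idxs, 10 ≤ pyDigitAt s1 i + pyDigitAt s2 i + pyDigitAt s3 i then 0
      else n1 + n2 + n3 := by
  induction idxs with
  | nil => simp [check_carry_go]
  | cons i rest ih =>
    rw [check_carry_go]
    by_cases hi : 10 ≤ pyDigitAt s1 i + pyDigitAt s2 i + pyDigitAt s3 i
    · simp [hi]
    · rw [if_neg (by exact hi), ih]
      refine if_congr ?_ rfl rfl
      simp [hi]

-- casts for B's arithmetic on nonnegative inputs
theorem pv_mod10 (a : Nat) : PySem.Int.mod (a : Int) 10 = ((a % 10 : Nat) : Int) := by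
  simp [PySem.Int.mod, Int.fmod_eq_emod]

theorem pv_div10 (a : Nat) : PySem.Int.floordiv (a : Int) 10 = ((a / 10 : Nat) : Int) := by
  simp [PySem.Int.floordiv, Int.fdiv_eq_ediv]

-- B's loop = "any digit position sums to ≥ 10" (fuel large enough to exhaust the digits)
theorem pv_alt_go_eq : ∀ (fuel : Nat) (a b c : Nat) (res : Int),
    a < 10 ^ fuel → b < 10 ^ fuel → c < 10 ^ fuel →
    check_carry_alt_go fuel (a : Int) (b : Int) (c : Int) res =
      if ∃ p, p < fuel ∧ 10 ≤ pvDig a p + pvDig b p + pvDig c p then 0 else res := by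
  intro fuel
  induction fuel with
  | zero =>
    intro a b c res ha hb hc
    simp [check_carry_alt_go]
  | succ f ih =>
    intro a b c res ha hb hc
    rw [check_carry_alt_go]
    by_cases hz : a = 0 ∧ b = 0 ∧ c = 0
    · obtain ⟨ha0, hb0, hc0⟩ := hz
      subst ha0; subst hb0; subst hc0
      rw [if_neg (by simp), if_neg ?side]
      case side =>
        rintro ⟨p, _, hp⟩
        have : pvDig 0 p = 0 := by unfold pvDig; simp
        omega
    · rw [if_pos (by push Not at hz; by_cases h1 : a = 0 <;> by_cases h2 : b = 0 <;>
          simp_all [Int.natCast_eq_zero])]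
      rw [pv_mod10, pv_mod10, pv_mod10]
      by_cases h0 : (10 : Int) ≤ (a % 10 : Nat) + (b % 10 : Nat) + (c % 10 : Nat)
      · rw [if_pos h0, if_pos ?wit]
        case wit =>
          refine ⟨0, by omega, ?_⟩
          rw [pvDig_zero_eq, pvDig_zero_eq, pvDig_zero_eq]
          exact_mod_cast h0
      · rw [if_neg h0, pv_div10, pv_div10, pv_div10,
          ih (a / 10) (b / 10) (c / 10) res (by omega) (by omega) (by omega)]
        refine if_congr ?_ rfl rfl
        constructor
        · rintro ⟨p, hp, hs⟩
          rw [pvDig_div, pvDig_div, pvDig_div] at hs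
          exact ⟨p + 1, by omega, hs⟩
        · rintro ⟨p, hp, hs⟩
          match p with
          | 0 =>
            exfalso
            rw [pvDig_zero_eq, pvDig_zero_eq, pvDig_zero_eq] at hs
            exact h0 (by exact_mod_cast hs)
          | q + 1 =>
            refine ⟨q, by omega, ?_⟩
            rw [pvDig_div, pvDig_div, pvDig_div]
            exact hs

-- toChars of a nonnegative int
theorem pv_toChars_natCast (m : Nat) : PySem.Int.toChars (m : Int) = Nat.toDigits 10 m := by
  simp [PySem.Int.toChars]

-- the whole equivalence, stated over Nat
theorem pv_main (m1 m2 m3 : Nat) (h1 : m1 ≤ 2147483648) (h2 : m2 ≤ 2147483648)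
    (h3 : m3 ≤ 2147483648) :
    check_carry (m1 : Int) (m2 : Int) (m3 : Int) = check_carry_alt (m1 : Int) (m2 : Int) (m3 : Int) := by
  have hch1 := pv_toChars_natCast m1
  have hch2 := pv_toChars_natCast m2
  have hch3 := pv_toChars_natCast m3
  set L1 := (Nat.toDigits 10 m1).length with hL1
  set L2 := (Nat.toDigits 10 m2).length with hL2
  set L3 := (Nat.toDigits 10 m3).length with hL3
  set L := max (max L1 L2) L3 with hL
  -- digit-count bounds: 2^31 < 10^11
  have hlen1 : L1 ≤ 11 := Nat.toDigits_length 10 m1 11 (by norm_num) (by omega)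
  have hlen2 : L2 ≤ 11 := Nat.toDigits_length 10 m2 11 (by norm_num) (by omega)
  have hlen3 : L3 ≤ 11 := Nat.toDigits_length 10 m3 11 (by norm_num) (by omega)
  have hL64 : L ≤ 64 := by omega
  have hmaxlen :
      max (max (PySem.List.len (Nat.toDigits 10 m1)) (PySem.List.len (Nat.toDigits 10 m2)))
          (PySem.List.len (Nat.toDigits 10 m3)) = (L : Int) := by
    simp only [PySem.List.len, hL]
    push_cast
    rw [hL1, hL2, hL3]
  -- A side
  simp only [check_carry, hch1, hch2, hch3]
  rw [hmaxlen, pv_go_eq]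
  -- B side
  rw [check_carry_alt,
    pv_alt_go_eq 64 m1 m2 m3 ((m1 : Int) + (m2 : Int) + (m3 : Int))
      (by omega) (by omega) (by omega)]
  -- the two conditions are equivalent
  refine if_congr ?_ rfl rfl
  have hle1 : L1 ≤ L := le_trans (le_max_left _ _) (le_max_left _ _)
  have hle2 : L2 ≤ L := le_trans (le_max_right _ _) (le_max_left _ _)
  have hle3 : L3 ≤ L := le_max_right _ _
  have hzero : ∀ p, L ≤ p → pvDig m1 p = 0 ∧ pvDig m2 p = 0 ∧ pvDig m3 p = 0 := by
    intro p hp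
    exact ⟨pvDig_zero_of_lt m1 p L1 (pv_lt_pow_length m1) (le_trans hle1 hp),
      pvDig_zero_of_lt m2 p L2 (pv_lt_pow_length m2) (le_trans hle2 hp),
      pvDig_zero_of_lt m3 p L3 (pv_lt_pow_length m3) (le_trans hle3 hp)⟩
  constructor
  · rintro ⟨i, hmem, hsum⟩
    rw [PySem.List.mem_pyRange_one] at hmem
    obtain ⟨hi0, hiL⟩ := hmem
    have hj : i.toNat < L := by omega
    have hicast : i = (i.toNat : Int) := by omega
    rw [hicast, pv_digitAt_eq m1 L i.toNat hle1 hj, pv_digitAt_eq m2 L i.toNat hle2 hj,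
      pv_digitAt_eq m3 L i.toNat hle3 hj] at hsum
    exact ⟨L - 1 - i.toNat, by omega, by exact_mod_cast hsum⟩
  · rintro ⟨p, hp64, hsum⟩
    have hpL : p < L := by
      by_contra hge
      obtain ⟨e1, e2, e3⟩ := hzero p (by omega)
      omega
    have hj : L - 1 - p < L := by omega
    refine ⟨((L - 1 - p : Nat) : Int), ?_, ?_⟩
    · rw [PySem.List.mem_pyRange_one]
      exact ⟨Int.natCast_nonneg _, by exact_mod_cast hj⟩
    · rw [pv_digitAt_eq m1 L (L - 1 - p) hle1 hj, pv_digitAt_eq m2 L (L - 1 - p) hle2 hj,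
        pv_digitAt_eq m3 L (L - 1 - p) hle3 hj]
      have hpp : L - 1 - (L - 1 - p) = p := by omega
      rw [hpp]
      exact_mod_cast hsum

-- ===== VERDICT (by name: the statement is the Claim_ definition above) =====
theorem check_carry_spec : Claim_equal_check_carry := by
  intro num1 num2 num3 hdom hpre
  obtain ⟨h1, h2, h3⟩ := hpre
  have hb : num1 ≤ 2147483648 ∧ num2 ≤ 2147483648 ∧ num3 ≤ 2147483648 := by
    unfold Dom_check_carry pvDomInt at hdom
    simp only [Bool.and_eq_true, decide_eq_true_eq] at hdom
    exact ⟨hdom.1.1.2, hdom.1.2.2, hdom.2.2⟩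
  unfold Spec_check_carry
  have e1 : num1 = (num1.toNat : Int) := (Int.toNat_of_nonneg h1).symm
  have e2 : num2 = (num2.toNat : Int) := (Int.toNat_of_nonneg h2).symm
  have e3 : num3 = (num3.toNat : Int) := (Int.toNat_of_nonneg h3).symm
  rw [e1, e2, e3]
  exact pv_main num1.toNat num2.toNat num3.toNat (by omega) (by omega) (by omega)
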